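-- pv_equiv track=rewrite | github.com/Unknown220725/Algorithm | 프로그래머스/0/120815. 피자 나눠 먹기 （2）/피자 나눠 먹기 （2）.py | solution
-- ===== SOURCE A (Python) =====
-- def solution(n):
--     answer = 0
--     # box = 0
--
--     while(True):
--         answer += n
--         if(answer%6==0):
--             answer = int(answer/6)
--             break
--
--     return answer
-- ===== SOURCE B (Python) =====
-- from math import gcd
--
-- def solution(n):
--     # closed form: lcm(n,6)/6 = n / gcd(n,6)
--     return n // gcd(n, 6)
-- ===== Notes on version B (the rewrite author's own statement) =====
-- stated objective: simpler
-- what changed: Replaced A's accumulate-until-divisible-by-6 loop with the closed form n // gcd(n, 6).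
import Mathlib
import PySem

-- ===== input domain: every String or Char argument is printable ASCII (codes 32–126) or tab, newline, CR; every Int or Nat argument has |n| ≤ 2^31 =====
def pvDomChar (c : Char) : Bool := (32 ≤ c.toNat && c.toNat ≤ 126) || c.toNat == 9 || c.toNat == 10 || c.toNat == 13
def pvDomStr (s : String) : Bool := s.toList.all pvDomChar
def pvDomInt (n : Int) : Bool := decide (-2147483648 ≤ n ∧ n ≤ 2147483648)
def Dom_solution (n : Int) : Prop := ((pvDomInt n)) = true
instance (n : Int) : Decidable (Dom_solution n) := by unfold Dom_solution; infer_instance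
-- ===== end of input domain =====

-- ===== PORT A =====
-- header: B replaces A's accumulate-until-divisible-by-6 loop with the closed form n // gcd(n, 6) (simpler).
-- A's `while True` loop ends within at most 6 iterations (6*n is always divisible by 6),
-- so a fuel of 6 makes the same computation total without changing any result.
-- `int(answer/6)` is exact here because answer is divisible by 6; ported as exact division.
def solutionLoop (n : Int) : Nat → Int → Int
  | 0, answer => answer
  | fuel + 1, answer =>
    let answer := answer + n
    if PySem.Int.mod answer 6 = 0 then answer / 6
    else solutionLoop n fuel answer

def solution (n : Int) : Int := solutionLoop n 6 0

-- ===== PORT B =====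
def solution_alt (n : Int) : Int := PySem.Int.floordiv n (Int.gcd n 6)

-- ===== PRECONDITION & SPEC =====
def Spec_solution (n : Int) (out : Int) : Prop := out = solution_alt n
instance (n : Int) (out : Int) : Decidable (Spec_solution n out) := by unfold Spec_solution; infer_instance

-- ===== CLAIM (what is proved, stated in full; the proofs are below) =====
def Claim_equal_solution : Prop := ∀ (n : Int), Dom_solution n → Spec_solution n (solution n)

-- ===== LEMMAS AND PROOFS =====

lemma gcd_shift (a q : Int) : Int.gcd (a + 6 * q) 6 = Int.gcd a 6 := by
  apply Nat.dvd_antisymm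
  · refine Int.dvd_gcd ?_ (Int.gcd_dvd_right (a + 6 * q) 6)
    have h1 : ((Int.gcd (a + 6 * q) 6 : Nat) : Int) ∣ (a + 6 * q) := Int.gcd_dvd_left _ _
    have h2 : ((Int.gcd (a + 6 * q) 6 : Nat) : Int) ∣ 6 * q := (Int.gcd_dvd_right _ _).mul_right q
    simpa using h1.sub h2
  · refine Int.dvd_gcd ?_ (Int.gcd_dvd_right a 6)
    have h1 : ((Int.gcd a 6 : Nat) : Int) ∣ a := Int.gcd_dvd_left _ _
    have h2 : ((Int.gcd a 6 : Nat) : Int) ∣ 6 * q := (Int.gcd_dvd_right _ _).mul_right q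
    exact h1.add h2

lemma key (n : Int) : solution n = solution_alt n := by
  have hb : (0:Int) ≤ n % 6 := Int.emod_nonneg n (by norm_num)
  have hb2 : n % 6 < 6 := Int.emod_lt_of_pos n (by norm_num)
  set q := n / 6 with hq
  set r := n % 6 with hrdef
  have hn : n = r + 6 * q := by omega
  have hg : Int.gcd n 6 = Int.gcd r 6 := by rw [hn, gcd_shift]
  have g0 : Int.gcd (0:Int) 6 = 6 := by decide
  have g1 : Int.gcd (1:Int) 6 = 1 := by decide
  have g2 : Int.gcd (2:Int) 6 = 2 := by decide
  have g3 : Int.gcd (3:Int) 6 = 3 := by decide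
  have g4 : Int.gcd (4:Int) 6 = 2 := by decide
  have g5 : Int.gcd (5:Int) 6 = 1 := by decide
  interval_cases r <;>
    simp only [solution, solutionLoop, solution_alt, hg, g0, g1, g2, g3, g4, g5,
      Nat.cast_ofNat, Nat.cast_one,
      PySem.Int.mod_eq_emod_of_pos (show (0:Int) < 6 by norm_num),
      PySem.Int.floordiv_eq_ediv_of_pos (show (0:Int) < 6 by norm_num),
      PySem.Int.floordiv_eq_ediv_of_pos (show (0:Int) < 1 by norm_num),
      PySem.Int.floordiv_eq_ediv_of_pos (show (0:Int) < 2 by norm_num),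
      PySem.Int.floordiv_eq_ediv_of_pos (show (0:Int) < 3 by norm_num)] <;>
    split_ifs <;> omega

-- ===== VERDICT (by name: the statement is the Claim_ definition above) =====
theorem solution_spec : Claim_equal_solution := by
  intro n _
  unfold Spec_solution
  exact key n
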